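-- pv_equiv track=rewrite | github.com/daniel-reich/ubiquitous-fiesta | xYRNzJB7kAXXEQSdF_12.py | wiggle_string
-- ===== SOURCE A (Python) =====
-- def wiggle_string(s):
--   tr = []
--
--   for n in range(0, len(s)+1):
--     string = ''
--     for num in range(n):
--       string += ' '
--     string += s
--     tr.append(string)
--
--   for n in reversed(range(0, len(s))):
--     string = ''
--     for num in range(n):
--       string += ' '
--     string += s
--     tr.append(string)
--
--   return tr
-- ===== SOURCE B (Python) =====
-- def wiggle_string(s):
--   up = [' ' * n + s for n in range(len(s) + 1)]
--   return up + up[-2::-1]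
-- ===== Notes on version B (the rewrite author's own statement) =====
-- stated objective: simpler
-- what changed: B builds the ascending half once with string repetition and mirrors it with a reverse slice up[-2::-1], instead of re-generating every string with nested one-character-append loops in two separate passes.
import Mathlib
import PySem

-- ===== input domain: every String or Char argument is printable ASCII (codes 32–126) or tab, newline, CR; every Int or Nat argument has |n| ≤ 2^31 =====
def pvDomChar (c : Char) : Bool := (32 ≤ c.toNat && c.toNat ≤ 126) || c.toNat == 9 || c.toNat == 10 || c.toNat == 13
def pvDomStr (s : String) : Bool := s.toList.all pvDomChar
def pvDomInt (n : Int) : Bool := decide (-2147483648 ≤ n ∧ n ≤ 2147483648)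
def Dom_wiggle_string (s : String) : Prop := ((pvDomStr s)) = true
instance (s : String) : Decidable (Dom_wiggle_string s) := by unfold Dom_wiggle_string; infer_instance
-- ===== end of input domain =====

-- B builds the ascending half once and mirrors it with a reverse slice instead of
-- re-generating the descending half with nested character-append loops (objective: simpler).

-- ===== PORT A =====
-- inner loop: string = ''; for num in range(n): string += ' '
def wiggle_pad (n : Nat) (s : String) : String :=
  ((List.range n).foldl (fun st _ => st ++ " ") "") ++ s

def wiggle_string (s : String) : List String :=
  let len := s.toList.length        -- len(s): number of characters, exact
  let tr₁ := (List.range (len + 1)).foldl (fun tr n => tr ++ [wiggle_pad n s]) []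
  ((List.range len).reverse).foldl (fun tr n => tr ++ [wiggle_pad n s]) tr₁

-- ===== PORT B =====
def wiggle_string_alt (s : String) : List String :=
  let up := (List.range (s.toList.length + 1)).map (fun n => String.ofList (List.replicate n ' ') ++ s)
  up ++ up.dropLast.reverse         -- up[-2::-1] = reversed(up[:-1]), exact for every list

-- ===== PRECONDITION & SPEC =====
def Spec_wiggle_string (s : String) (out : List String) : Prop := out = wiggle_string_alt s
instance (s : String) (out : List String) : Decidable (Spec_wiggle_string s out) := by unfold Spec_wiggle_string; infer_instance

-- ===== CLAIM (what is proved, stated in full; the proofs are below) =====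
def Claim_equal_wiggle_string : Prop := ∀ (s : String), Dom_wiggle_string s → Spec_wiggle_string s (wiggle_string s)

-- ===== LEMMAS AND PROOFS =====

theorem wiggle_spaces (n : Nat) (init : String) :
    (List.range n).foldl (fun st _ => st ++ " ") init = init ++ String.ofList (List.replicate n ' ') := by
  induction n generalizing init with
  | zero => apply String.ext; simp
  | succ k ih =>
      rw [List.range_succ, List.foldl_append, ih]
      simp [List.foldl]
      apply String.ext
      simp [List.replicate_succ']

theorem wiggle_pad_eq (n : Nat) (s : String) :
    wiggle_pad n s = String.ofList (List.replicate n ' ') ++ s := by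
  rw [wiggle_pad, wiggle_spaces]
  apply String.ext
  simp

theorem wiggle_foldl_map {α β : Type} (f : α → β) (l : List α) (acc : List β) :
    l.foldl (fun tr n => tr ++ [f n]) acc = acc ++ l.map f := by
  induction l generalizing acc with
  | nil => simp
  | cons x xs ih => simp [List.foldl, ih]

-- ===== VERDICT (by name: the statement is the Claim_ definition above) =====
theorem wiggle_string_spec : Claim_equal_wiggle_string := by
  intro s _
  unfold Spec_wiggle_string wiggle_string wiggle_string_alt
  simp only [wiggle_foldl_map, List.nil_append]
  have h : ((List.range (s.toList.length + 1)).map (fun n => wiggle_pad n s)).dropLast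
      = (List.range s.toList.length).map (fun n => wiggle_pad n s) := by
    rw [← List.map_dropLast]
    congr 1
    rw [List.range_succ]
    simp
  simp only [funext fun n => wiggle_pad_eq n s] at *
  rw [h, List.map_reverse]
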